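-- pv_equiv track=rewrite | github.com/aditgupta1/Ontologi | web_crawler/run.py | distribute
-- ===== SOURCE A (Python) =====
-- def distribute(arr, n):
--     lists = [[] for _ in range(n)]
--     i = 0
--     total = len(arr)
--     counter = 0
--     while i < total:
--         lists[counter].append(arr[i])
--         i += 1
--         counter = (counter + 1) % n
--     return lists
-- ===== SOURCE B (Python) =====
-- def distribute(arr, n):
--     return [list(arr[k::n]) for k in range(n)]
-- ===== Notes on version B (the rewrite author's own statement) =====
-- stated objective: idiomatic
-- what changed: B builds each of the n buckets directly as a strided slice arr[k::n] instead of A's element-by-element dispatch loop with a rotating counter.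
import Mathlib
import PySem

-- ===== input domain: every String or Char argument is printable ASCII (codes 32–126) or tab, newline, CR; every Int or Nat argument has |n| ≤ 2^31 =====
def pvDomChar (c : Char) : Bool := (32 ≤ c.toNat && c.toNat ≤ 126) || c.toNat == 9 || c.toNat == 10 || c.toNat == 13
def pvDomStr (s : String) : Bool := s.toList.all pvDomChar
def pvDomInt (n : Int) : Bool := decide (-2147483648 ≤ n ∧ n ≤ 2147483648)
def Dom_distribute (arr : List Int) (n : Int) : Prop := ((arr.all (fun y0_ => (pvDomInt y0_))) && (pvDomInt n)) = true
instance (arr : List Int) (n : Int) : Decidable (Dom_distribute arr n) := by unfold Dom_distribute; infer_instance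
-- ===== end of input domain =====

-- B replaces A's element-by-element rotating-counter dispatch by building each bucket as a strided slice (idiomatic, same cost).


-- ===== PORT A =====
-- while i < total: lists[counter].append(arr[i]); i += 1; counter = (counter+1) % n
def distLoop (n : Int) : List Int → List (List Int) → Int → List (List Int)
  | [], lists, _ => lists
  | x :: xs, lists, counter =>
      distLoop n xs (lists.modify counter.toNat (· ++ [x])) (PySem.Int.mod (counter + 1) n)

def distribute (arr : List Int) (n : Int) : List (List Int) :=
  distLoop n arr (List.replicate n.toNat []) 0

-- ===== PORT B =====
-- arr[k::n] for n ≥ 1: the elements at indices k, k+n, k+2n, …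
def stride (n : Nat) : List Int → List Int
  | [] => []
  | x :: xs => x :: stride n (xs.drop (n - 1))
  termination_by xs => xs.length
  decreasing_by simp

def distribute_alt (arr : List Int) (n : Int) : List (List Int) :=
  (List.range n.toNat).map (fun k => stride n.toNat (arr.drop k))

-- ===== PRECONDITION & SPEC =====
-- Pre_ excludes exactly the inputs where A raises IndexError: n ≤ 0 with non-empty arr.
def Pre_distribute (arr : List Int) (n : Int) : Prop := 1 ≤ n ∨ arr = []
instance (arr : List Int) (n : Int) : Decidable (Pre_distribute arr n) := by unfold Pre_distribute; infer_instance
def pvWitness_distribute : List Int × Int := ([1, 2, 3, 4, 5], 2)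

def Spec_distribute (arr : List Int) (n : Int) (out : List (List Int)) : Prop := out = distribute_alt arr n
instance (arr : List Int) (n : Int) (out : List (List Int)) : Decidable (Spec_distribute arr n out) := by unfold Spec_distribute; infer_instance

-- ===== CLAIM =====
def Claim_equal_distribute : Prop := ∀ (arr : List Int) (n : Int), Dom_distribute arr n → Pre_distribute arr n → Spec_distribute arr n (distribute arr n)

-- ===== LEMMAS AND PROOFS =====

-- bucket-offset function: where inside the stride bucket j the loop with counter c stands
def off (j c N : Nat) : Nat := if j < c then j + N - c else j - c

theorem stride_nil (N : Nat) : stride N [] = [] := by rw [stride]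

theorem stride_cons (N : Nat) (x : Int) (xs : List Int) :
    stride N (x :: xs) = x :: stride N (xs.drop (N - 1)) := by rw [stride]

-- loop invariant: bucket j receives the elements of xs at positions ≡ off j c N (mod N)
theorem distLoop_inv (N : Nat) (hN : 1 ≤ N) (xs : List Int) :
    ∀ (lists : List (List Int)) (c : Nat), lists.length = N → c < N →
    distLoop (N : Int) xs lists (c : Int) =
      lists.mapIdx (fun j l => l ++ stride N (xs.drop (off j c N))) := by
  induction xs with
  | nil =>
      intro lists c hl hc
      simp only [distLoop]
      apply List.ext_getElem (by simp)
      intro j h1 h2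
      simp [stride_nil]
  | cons x xs ih =>
      intro lists c hl hc
      have hcast : ((c : Int) + 1) = ((c + 1 : Nat) : Int) := by push_cast; ring
      have hmod : PySem.Int.mod ((c : Int) + 1) (N : Int) = (((c + 1) % N : Nat) : Int) := by
        rw [hcast]; exact PySem.Int.mod_natCast _ _
      have htoNat : ((c : Int)).toNat = c := by simp
      have hstep : distLoop (N : Int) (x :: xs) lists (c : Int) =
          distLoop (N : Int) xs (lists.modify c (· ++ [x])) ((((c + 1) % N : Nat) : Int)) := by
        simp only [distLoop, htoNat, hmod]
      rw [hstep, ih (lists.modify c (· ++ [x])) ((c + 1) % N)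
            (by simp [hl]) (Nat.mod_lt _ (by omega))]
      apply List.ext_getElem (by simp)
      intro j h1 h2
      have hj : j < N := by simpa [hl] using h1
      have hc1 : (c + 1) % N = if c + 1 = N then 0 else c + 1 := by
        by_cases h : c + 1 = N
        · simp [h]
        · rw [if_neg h]; exact Nat.mod_eq_of_lt (by omega)
      simp only [List.getElem_mapIdx, List.getElem_modify]
      by_cases hjc : c = j
      · subst hjc
        have h0 : off c c N = 0 := by simp [off]
        have hNN : off c ((c + 1) % N) N = N - 1 := by
          rw [hc1]; unfold off; split_ifs <;> omega
        rw [h0, hNN]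
        simp [stride_cons, List.append_assoc]
      · have hoff : 1 ≤ off j c N ∧ off j c N ≤ N - 1 := by
          unfold off; split_ifs <;> omega
        have hdrop : (x :: xs).drop (off j c N) = xs.drop (off j c N - 1) := by
          obtain ⟨h1', _⟩ := hoff
          rcases Nat.exists_eq_add_of_le h1' with ⟨m, hm⟩
          rw [hm, Nat.add_comm]; simp
        have hoff' : off j ((c + 1) % N) N = off j c N - 1 := by
          rw [hc1]; unfold off; split_ifs <;> omega
        rw [if_neg hjc, hdrop, hoff']

-- ===== VERDICT =====
theorem distribute_spec : Claim_equal_distribute := by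
  intro arr n _ hpre
  unfold Spec_distribute distribute distribute_alt
  rcases hpre with hn | harr
  · obtain ⟨N, rfl⟩ := Int.eq_ofNat_of_zero_le (by omega : (0 : Int) ≤ n)
    have hN : 1 ≤ N := by exact_mod_cast hn
    have key := distLoop_inv N hN arr (List.replicate N []) 0 (by simp) (by omega)
    simp only [Nat.cast_zero] at key
    simp only [Int.toNat_natCast]
    rw [key]
    apply List.ext_getElem (by simp)
    intro j h1 h2
    simp [List.getElem_mapIdx, off]
  · subst harr
    apply List.ext_getElem (by simp [distLoop])
    intro j h1 h2
    simp only [distLoop, List.getElem_replicate, List.getElem_map, List.drop_nil, stride_nil]
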